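-- pv_equiv track=rewrite | github.com/WillYeadon/coding-practice | ctci/chpt5/problem-5-7.py | bitSwap
-- ===== SOURCE A (Python) =====
-- def bitSwap(x):
--     # Gonna have to manipulate as string
--     orig = bin(x).split('0b')[1][::-1]
--     if (len(orig) % 2) == 1:
--         orig += '0'
--
--     odds = ''
--     evens = ''
--
--     for i in range(0,len(orig), 2):
--         evens += orig[i]
--
--     for i in range(1, len(orig), 2):
--         odds += orig[i]
--
--     output = ''
--     for i, j in zip(odds, evens):
--         output += i
--         output += j
--
--
--     return '0b' + output[::-1]
-- ===== SOURCE B (Python) =====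
-- def bitSwap(x):
--     # Direct bit extraction: no string reversal, no parity split, no zip.
--     m = abs(x)
--     half = (max(m.bit_length(), 1) + 1) // 2
--     out = '0b'
--     for k in reversed(range(half)):
--         out += '1' if (m >> (2 * k)) & 1 else '0'
--         out += '1' if (m >> (2 * k + 1)) & 1 else '0'
--     return out
-- ===== Notes on version B (the rewrite author's own statement) =====
-- stated objective: idiomatic
-- what changed: Instead of reversing bin()'s string, splitting it into even/odd characters and re-interleaving them via zip, B reads each output bit directly from abs(x) with shifts and masks in one pass over the even-rounded bit width.
import Mathlib
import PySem

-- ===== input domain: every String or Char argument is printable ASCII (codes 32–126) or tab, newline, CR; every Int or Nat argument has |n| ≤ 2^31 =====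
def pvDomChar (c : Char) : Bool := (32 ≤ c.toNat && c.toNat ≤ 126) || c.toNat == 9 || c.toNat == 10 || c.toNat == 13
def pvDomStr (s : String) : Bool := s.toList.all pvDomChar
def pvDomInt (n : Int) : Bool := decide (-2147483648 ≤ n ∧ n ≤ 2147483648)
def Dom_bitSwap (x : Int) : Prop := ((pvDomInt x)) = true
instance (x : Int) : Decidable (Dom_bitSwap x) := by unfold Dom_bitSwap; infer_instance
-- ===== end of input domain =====

-- B swaps adjacent bit pairs by direct shift/mask bit extraction instead of A's
-- reverse / parity-split / zip string manipulation (objective: idiomatic; same return value).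

-- ===== PORT A =====
-- binary digits of n, least significant first (the reversal of bin(n)'s digit part, n > 0)
def binDigitsRev (n : Nat) : List Char :=
  if h : n = 0 then []
  else (if n % 2 = 1 then '1' else '0') :: binDigitsRev (n / 2)
termination_by n
decreasing_by exact Nat.div_lt_self (Nat.pos_of_ne_zero h) one_lt_two

def bitSwap (x : Int) : String :=
  -- bin(x).split('0b')[1]: the binary digit characters of |x| (bin is '0b…' / '-0b…';
  -- splitting at '0b' and taking [1] keeps exactly the digits, for both signs)
  let digits : List Char :=
    if x.natAbs = 0 then ['0'] else (binDigitsRev x.natAbs).reverse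
  let orig0 := digits.reverse                                   -- [::-1]
  let orig := if orig0.length % 2 = 1 then orig0 ++ ['0'] else orig0
  let evens := (PySem.List.pyRange 0 (orig.length : Int) 2).foldl
    (fun acc i => acc ++ [PySem.List.pyGetD orig i ' ']) []
  let odds := (PySem.List.pyRange 1 (orig.length : Int) 2).foldl
    (fun acc i => acc ++ [PySem.List.pyGetD orig i ' ']) []
  let output := (odds.zip evens).foldl (fun acc p => acc ++ [p.1, p.2]) []
  String.mk ('0' :: 'b' :: output.reverse)

-- ===== PORT B =====
-- '1' if (m >> e) & 1 else '0'
def bitChar (m e : Nat) : Char := if (m >>> e) &&& 1 ≠ 0 then '1' else '0'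

-- m.bit_length()
def bitLen (n : Nat) : Nat :=
  if h : n = 0 then 0 else bitLen (n / 2) + 1
termination_by n
decreasing_by exact Nat.div_lt_self (Nat.pos_of_ne_zero h) one_lt_two

def bitSwap_alt (x : Int) : String :=
  let m := x.natAbs
  let half := (max (bitLen m) 1 + 1) / 2
  String.mk ((List.range half).reverse.foldl
    (fun acc k => acc ++ [bitChar m (2 * k), bitChar m (2 * k + 1)]) ['0', 'b'])

-- ===== PRECONDITION & SPEC =====
def Spec_bitSwap (x : Int) (out : String) : Prop := out = bitSwap_alt x
instance (x : Int) (out : String) : Decidable (Spec_bitSwap x out) := by unfold Spec_bitSwap; infer_instance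

-- ===== CLAIM (what is proved, stated in full; the proofs are below) =====
def Claim_equal_bitSwap : Prop := ∀ (x : Int), Dom_bitSwap x → Spec_bitSwap x (bitSwap x)

-- ===== LEMMAS AND PROOFS =====

theorem bitChar_succ (n k : Nat) : bitChar n (k + 1) = bitChar (n / 2) k := by
  unfold bitChar
  rw [Nat.add_comm k 1, Nat.shiftRight_add, Nat.shiftRight_one]

theorem bitChar_zero (n : Nat) :
    bitChar n 0 = (if n % 2 = 1 then '1' else '0') := by
  unfold bitChar
  simp only [Nat.shiftRight_zero, Nat.and_one_is_mod]
  have : n % 2 = 0 ∨ n % 2 = 1 := by omega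
  rcases this with h | h <;> simp [h]

theorem binDigitsRev_eq (n : Nat) :
    binDigitsRev n = (List.range (bitLen n)).map (bitChar n) := by
  induction n using Nat.strong_induction_on with
  | _ n ih =>
    by_cases h : n = 0
    · subst h; rw [binDigitsRev, bitLen]; simp
    · rw [binDigitsRev, bitLen]
      simp only [h, dite_false, List.range_succ_eq_map, List.map_cons, List.map_map]
      have hlt : n / 2 < n := Nat.div_lt_self (Nat.pos_of_ne_zero h) one_lt_two
      rw [ih _ hlt, bitChar_zero]
      congr 1
      apply List.map_congr_left
      intro k _
      simp only [Function.comp_apply, Nat.succ_eq_add_one]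
      exact (bitChar_succ n k).symm

theorem bitLen_bound (n : Nat) : n < 2 ^ (bitLen n) := by
  induction n using Nat.strong_induction_on with
  | _ n ih =>
    by_cases h : n = 0
    · subst h; rw [bitLen]; simp
    · rw [bitLen]
      simp only [h, dite_false]
      have hlt : n / 2 < n := Nat.div_lt_self (Nat.pos_of_ne_zero h) one_lt_two
      have := ih _ hlt
      have : n / 2 < 2 ^ (bitLen (n / 2)) := this
      rw [pow_succ]
      omega

theorem bitChar_high (n e : Nat) (h : bitLen n ≤ e) : bitChar n e = '0' := by
  unfold bitChar
  have h1 : n < 2 ^ e := lt_of_lt_of_le (bitLen_bound n) (Nat.pow_le_pow_right (by norm_num) h)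
  have h2 : n >>> e = 0 := by
    rw [Nat.shiftRight_eq_div_pow]
    exact Nat.div_eq_of_lt h1
  simp [h2]

theorem bitLen_pos (n : Nat) (h : n ≠ 0) : 1 ≤ bitLen n := by
  rw [bitLen]; simp [h]

-- the padded reversed digit string is exactly the low `2*half` bit characters of m
theorem orig_eq (m : Nat) :
    (let digits : List Char :=
       if m = 0 then ['0'] else (binDigitsRev m).reverse
     let orig0 := digits.reverse
     if orig0.length % 2 = 1 then orig0 ++ ['0'] else orig0)
    = (List.range (2 * ((max (bitLen m) 1 + 1) / 2))).map (bitChar m) := by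
  simp only []
  by_cases h : m = 0
  · subst h
    have hb : bitLen 0 = 0 := by rw [bitLen]; simp
    simp [hb, List.range_succ]
    constructor
    · decide
    · decide
  · have h1 : 1 ≤ bitLen m := bitLen_pos m h
    have hmax : max (bitLen m) 1 = bitLen m := by omega
    simp only [h, if_false, List.reverse_reverse, binDigitsRev_eq, hmax]
    rw [List.length_map, List.length_range]
    by_cases hp : bitLen m % 2 = 1
    · have hw : 2 * ((bitLen m + 1) / 2) = bitLen m + 1 := by omega
      rw [hw, if_pos hp, List.range_succ, List.map_append]
      simp [bitChar_high m (bitLen m) le_rfl]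
    · have hw : 2 * ((bitLen m + 1) / 2) = bitLen m := by omega
      rw [hw, if_neg hp]

theorem pyRange_two_even (h : Nat) :
    PySem.List.pyRange 0 ((2 * h : Nat) : Int) 2
      = (List.range h).map (fun k => ((2 * k : Nat) : Int)) := by
  rw [PySem.List.pyRange_of_pos 0 ((2 * h : Nat) : Int) (by norm_num)]
  by_cases hh : h = 0
  · subst hh; simp
  · have hlt : (0 : Int) < ((2 * h : Nat) : Int) := by
      push_cast; omega
    rw [if_pos hlt]
    have : ((((2 * h : Nat) : Int) - 0 + 2 - 1) / 2).toNat = h := by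
      push_cast
      omega
    rw [this]
    apply List.map_congr_left
    intro k _
    push_cast
    ring

theorem pyRange_two_odd (h : Nat) :
    PySem.List.pyRange 1 ((2 * h : Nat) : Int) 2
      = (List.range h).map (fun k => ((2 * k + 1 : Nat) : Int)) := by
  rw [PySem.List.pyRange_of_pos 1 ((2 * h : Nat) : Int) (by norm_num)]
  by_cases hh : h = 0
  · subst hh; simp
  · have hlt : (1 : Int) < ((2 * h : Nat) : Int) := by
      push_cast; omega
    rw [if_pos hlt]
    have : ((((2 * h : Nat) : Int) - 1 + 2 - 1) / 2).toNat = h := by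
      push_cast
      omega
    rw [this]
    apply List.map_congr_left
    intro k _
    push_cast
    ring

-- reading the bit-character list at an even/odd position
theorem getD_orig (m w j : Nat) (hj : j < w) (d : Char) :
    PySem.List.pyGetD ((List.range w).map (bitChar m)) ((j : Nat) : Int) d = bitChar m j := by
  rw [PySem.List.pyGetD_natCast, PySem.List.getD_map_range _ _ _ _ hj]

theorem bitSwap_eq_alt (x : Int) : bitSwap x = bitSwap_alt x := by
  unfold bitSwap bitSwap_alt
  set m := x.natAbs with hm
  set half := (max (bitLen m) 1 + 1) / 2 with hhalf
  have hhalf1 : 1 ≤ half := by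
    have : 1 ≤ max (bitLen m) 1 := le_max_right _ _
    omega
  simp only []
  -- rewrite the padded reversed digits to the canonical bit-character list
  have horig := orig_eq m
  simp only [] at horig
  rw [horig]
  set w := 2 * half with hw
  set f := bitChar m with hf
  set orig := (List.range w).map f with horigdef
  have hlen : (orig.length : Int) = ((w : Nat) : Int) := by
    simp [horigdef]
  rw [hlen]
  -- evens and odds as maps
  have heven : (PySem.List.pyRange 0 ((w : Nat) : Int) 2).foldl
      (fun acc i => acc ++ [PySem.List.pyGetD orig i ' ']) []
      = (List.range half).map (fun k => f (2 * k)) := by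
    rw [pyRange_two_even half, PySem.List.foldl_append_singleton_eq_map]
    simp only [List.nil_append, List.map_map]
    apply List.map_congr_left
    intro k hk
    simp only [Function.comp_apply]
    exact getD_orig m w (2 * k) (by simp [List.mem_range] at hk; omega) ' '
  have hodd : (PySem.List.pyRange 1 ((w : Nat) : Int) 2).foldl
      (fun acc i => acc ++ [PySem.List.pyGetD orig i ' ']) []
      = (List.range half).map (fun k => f (2 * k + 1)) := by
    rw [pyRange_two_odd half, PySem.List.foldl_append_singleton_eq_map]
    simp only [List.nil_append, List.map_map]
    apply List.map_congr_left
    intro k hk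
    simp only [Function.comp_apply]
    exact getD_orig m w (2 * k + 1) (by simp [List.mem_range] at hk; omega) ' '
  rw [heven, hodd, List.zip_map']
  rw [PySem.List.foldl_append_eq_flatMap (fun p : Char × Char => [p.1, p.2])]
  rw [PySem.List.foldl_append_eq_flatMap (fun k : Nat => [f (2 * k), f (2 * k + 1)])]
  simp only [List.nil_append, List.flatMap_map]
  congr 1
  -- reversing the interleaved output gives B's top-down pair list
  rw [List.flatMap_def, List.reverse_flatten, List.map_map, ← List.map_reverse, List.flatMap_def]
  rfl

-- ===== VERDICT (by name: the statement is the Claim_ definition above) =====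
theorem bitSwap_spec : Claim_equal_bitSwap := by
  intro x _
  unfold Spec_bitSwap
  exact bitSwap_eq_alt x
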